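-- pv_equiv track=rewrite | github.com/pypi-data/pypi-mirror-379 | packages/akris/akris-1.0.1.tar.gz/akris-1.0.1/akris/net_chain.py | sort_by_chain
-- ===== SOURCE A (Python) =====
-- def sort_by_chain(messages):
--     timestamp_groups = {}
--     for query_result in messages:
--         ts = query_result["timestamp"]
--         added = False
--         if timestamp_groups.get(ts, None) is None:
--             timestamp_groups[ts] = [query_result]
--         else:
--             for message in timestamp_groups[ts]:
--                 # if query_result is a descendent of message
--                 if message["message_hash"] in [query_result["net_chain"], query_result["self_chain"]]:
--                     timestamp_groups[ts].append(query_result)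
--                     added = True
--                     break
--                 # query_result is an antecedent of message
--                 elif query_result["message_hash"] in [message["net_chain"], message["self_chain"]]:
--                     timestamp_groups[ts].insert(timestamp_groups[ts].index(message), query_result)
--                     added = True
--                     break
--             if not added:
--                 timestamp_groups[ts].append(query_result)
--
--     # get the values of timestamp_groups as a list sorted by key (timestamp)
--     messages_ordered_by_ts_and_chain = []
--     ordered_ts_groups = [value for key, value in sorted(timestamp_groups.items())]
--     for ts_group in ordered_ts_groups:
--         messages_ordered_by_ts_and_chain += ts_group
--     return messages_ordered_by_ts_and_chain
-- ===== SOURCE B (Python) =====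
-- def sort_by_chain(messages):
--     # Distinct timestamps in sorted order; one filtering pass per timestamp
--     # replaces A's dict bookkeeping entirely.
--     timestamps = sorted({m["timestamp"] for m in messages})
--     return [m
--             for ts in timestamps
--             for m in _chain_order([q for q in messages if q["timestamp"] == ts])]
--
--
-- def _chain_order(group):
--     """Chain-order one timestamp group: classify each already-placed element's
--     relation to m, then splice m in with a single slice at the computed spot."""
--     ordered = []
--     for m in group:
--         rels = [_rel(p, m) for p in ordered]
--         k = next((i for i, r in enumerate(rels) if r), len(ordered))
--         pos = k if k < len(ordered) and rels[k] < 0 else len(ordered)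
--         ordered = ordered[:pos] + [m] + ordered[pos:]
--     return ordered
--
--
-- def _rel(p, m):
--     """1 if m is a descendant of p, -1 if m is an antecedent of p, 0 if unrelated."""
--     if p["message_hash"] in (m["net_chain"], m["self_chain"]):
--         return 1
--     if m["message_hash"] in (p["net_chain"], p["self_chain"]):
--         return -1
--     return 0
-- ===== Notes on version B (the rewrite author's own statement) =====
-- stated objective: alternative
-- what changed: B eliminates A's timestamp dict and its interleaved in-place group mutation (added flag, break, list.index, list.insert) altogether: it sorts the distinct timestamps and filters the input once per timestamp, and places each message by first classifying its relation to every already-placed element into a relation list and then splicing at one computed position with a single slice expression.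
import Mathlib
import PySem

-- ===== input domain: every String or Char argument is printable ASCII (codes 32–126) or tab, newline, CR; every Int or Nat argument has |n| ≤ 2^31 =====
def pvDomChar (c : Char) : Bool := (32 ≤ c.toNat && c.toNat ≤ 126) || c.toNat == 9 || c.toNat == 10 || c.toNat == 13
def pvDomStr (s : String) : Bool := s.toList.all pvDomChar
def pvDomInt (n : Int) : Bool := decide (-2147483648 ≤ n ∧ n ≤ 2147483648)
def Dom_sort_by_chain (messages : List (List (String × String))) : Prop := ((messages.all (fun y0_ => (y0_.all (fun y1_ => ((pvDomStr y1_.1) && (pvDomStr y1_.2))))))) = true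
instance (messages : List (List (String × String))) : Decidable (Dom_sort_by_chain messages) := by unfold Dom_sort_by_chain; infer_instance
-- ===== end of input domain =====

-- B drops A's dict-with-interleaved-mutation entirely: it sorts the distinct timestamps and
-- filters the input once per timestamp, placing each message by classifying relations and
-- splicing at one computed position (objective: alternative, same cost); equivalence on Pre_.


-- ===== PORT A =====
-- m[k] for a message dict; exact under Pre_ (key present, no duplicate keys in m)
def pvMsgGet (m : List (String × String)) (k : String) : String :=
  PySem.Dict.getD (PySem.Dict.mk m) k ""

-- A's inner `for message in timestamp_groups[ts]` up to its break: the first message that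
-- fires a branch (true = descendant/append branch, false = antecedent/insert branch)
def pvFindA (qr : List (String × String)) :
    List (List (String × String)) → Option (Bool × List (String × String))
  | [] => none
  | message :: rest =>
    if pvMsgGet message "message_hash" = pvMsgGet qr "net_chain" ∨
       pvMsgGet message "message_hash" = pvMsgGet qr "self_chain" then
      some (true, message)
    else if pvMsgGet qr "message_hash" = pvMsgGet message "net_chain" ∨
            pvMsgGet qr "message_hash" = pvMsgGet message "self_chain" then
      some (false, message)
    else pvFindA qr rest

-- the whole inner loop incl. the `if not added: append`; insert uses g.index(message)
def pvScanA (g : List (List (String × String))) (qr : List (String × String)) :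
    List (List (String × String)) :=
  match pvFindA qr g with
  | some (true, _) => g ++ [qr]
  | some (false, message) =>
      PySem.List.insert g (((PySem.List.index? g message).getD 0 : Nat) : Int) qr
  | none => g ++ [qr]

def sort_by_chain (messages : List (List (String × String))) : List (List (String × String)) :=
  let timestamp_groups :=
    messages.foldl (fun tg qr =>
      let ts := pvMsgGet qr "timestamp"
      match tg.get? ts with                       -- timestamp_groups.get(ts, None) is None
      | none => tg.insert ts [qr]
      | some g => tg.insert ts (pvScanA g qr)) (PySem.Dict.mk [])
  -- sorted(timestamp_groups.items()): dict keys are unique, so the tuple sort orders by key alone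
  let ordered_ts_groups :=
    (PySem.List.sorted timestamp_groups.items (fun kv => kv.1)).map (fun kv => kv.2)
  ordered_ts_groups.foldl (fun acc ts_group => acc ++ ts_group) []

-- ===== PORT B =====
-- _rel(p, m): 1 descendant, -1 antecedent, 0 unrelated
def pvRel (p m : List (String × String)) : Int :=
  if pvMsgGet p "message_hash" = pvMsgGet m "net_chain" ∨
     pvMsgGet p "message_hash" = pvMsgGet m "self_chain" then 1
  else if pvMsgGet m "message_hash" = pvMsgGet p "net_chain" ∨
          pvMsgGet m "message_hash" = pvMsgGet p "self_chain" then -1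
  else 0

-- one loop iteration of _chain_order: relation list, first hit, one splice
def pvChainStep (ordered : List (List (String × String))) (m : List (String × String)) :
    List (List (String × String)) :=
  let rels := ordered.map (fun p => pvRel p m)
  -- next((i for i, r in enumerate(rels) if r), len(ordered))
  let k := (rels.findIdx? (fun r => r != 0)).getD ordered.length
  -- rels[k] is in range exactly when the guard k < len(ordered) holds, so getD is exact here
  let pos := if k < ordered.length ∧ rels.getD k 0 < 0 then k else ordered.length
  ordered.take pos ++ [m] ++ ordered.drop pos    -- ordered[:pos] + [m] + ordered[pos:]

def pvChainOrder (group : List (List (String × String))) : List (List (String × String)) :=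
  group.foldl pvChainStep []

def sort_by_chain_alt (messages : List (List (String × String))) : List (List (String × String)) :=
  -- sorted({m["timestamp"] for m in messages})
  let timestamps :=
    PySem.List.sorted (PySem.Set.ofList (messages.map (fun m => pvMsgGet m "timestamp")))
      (fun x => x)
  -- [m for ts in timestamps for m in _chain_order([q for q in messages if q["timestamp"] == ts])]
  timestamps.flatMap (fun ts =>
    pvChainOrder (messages.filter (fun q => pvMsgGet q "timestamp" == ts)))

-- ===== PRECONDITION & SPEC =====
-- Pre_ excludes (a) messages whose association list repeats a key (no Python dict is like that),
-- (b) messages missing "timestamp" (A raises KeyError) and (c) messages with a duplicated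
-- timestamp missing one of the other three keys (the inner loop reads them; A raises KeyError
-- on most of these, though it can return without reading a group member's chain keys when the
-- descendant branch fires first — Pre_ is conservatively closed-form there, see cites).
def Pre_sort_by_chain (messages : List (List (String × String))) : Prop :=
  ∀ m ∈ messages,
    (m.map Prod.fst).Nodup ∧
    (PySem.Dict.mk m).contains "timestamp" = true ∧
    (2 ≤ messages.countP (fun m' => pvMsgGet m' "timestamp" == pvMsgGet m "timestamp") →
      (PySem.Dict.mk m).contains "message_hash" = true ∧
      (PySem.Dict.mk m).contains "net_chain" = true ∧
      (PySem.Dict.mk m).contains "self_chain" = true)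
instance (messages : List (List (String × String))) : Decidable (Pre_sort_by_chain messages) := by
  unfold Pre_sort_by_chain; infer_instance

def pvWitness_sort_by_chain : (List (List (String × String))) :=
  [[("timestamp", "1"), ("message_hash", "a"), ("net_chain", "x"), ("self_chain", "y")],
   [("timestamp", "1"), ("message_hash", "b"), ("net_chain", "a"), ("self_chain", "z")]]

def Spec_sort_by_chain (messages : List (List (String × String))) (out : List (List (String × String))) : Prop := out = sort_by_chain_alt messages
instance (messages : List (List (String × String))) (out : List (List (String × String))) : Decidable (Spec_sort_by_chain messages out) := by unfold Spec_sort_by_chain; infer_instance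

-- ===== CLAIM (what is proved, stated in full; the proofs are below) =====
def Claim_equal_sort_by_chain : Prop := ∀ (messages : List (List (String × String))), Dom_sort_by_chain messages → Pre_sort_by_chain messages → Spec_sort_by_chain messages (sort_by_chain messages)

-- ===== LEMMAS AND PROOFS =====

def pvTs (m : List (String × String)) : String := pvMsgGet m "timestamp"

-- the arrival-order bucket dict, as a modify-fold over (timestamp, message) pairs
def pvBucket (messages : List (List (String × String))) :
    PySem.Dict String (List (List (String × String))) :=
  (messages.map (fun m => (pvTs m, m))).foldl
    (fun d p => d.modify p.1 [] (· ++ [p.2])) (PySem.Dict.mk [])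

def pvMapD (d : PySem.Dict String (List (List (String × String)))) :
    PySem.Dict String (List (List (String × String))) :=
  PySem.Dict.mk (d.items.map (fun kv => (kv.1, pvChainOrder kv.2)))

lemma pvChainStep_cons (p : List (String × String)) (rest : List (List (String × String)))
    (m : List (String × String)) :
    pvChainStep (p :: rest) m =
      if pvMsgGet p "message_hash" = pvMsgGet m "net_chain" ∨
         pvMsgGet p "message_hash" = pvMsgGet m "self_chain" then (p :: rest) ++ [m]
      else if pvMsgGet m "message_hash" = pvMsgGet p "net_chain" ∨
              pvMsgGet m "message_hash" = pvMsgGet p "self_chain" then m :: p :: rest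
      else p :: pvChainStep rest m := by
  by_cases h1 : pvMsgGet p "message_hash" = pvMsgGet m "net_chain" ∨
      pvMsgGet p "message_hash" = pvMsgGet m "self_chain"
  · have hrel : pvRel p m = 1 := by simp [pvRel, h1]
    simp [pvChainStep, List.findIdx?_cons, hrel, h1]
  · by_cases h2 : pvMsgGet m "message_hash" = pvMsgGet p "net_chain" ∨
        pvMsgGet m "message_hash" = pvMsgGet p "self_chain"
    · have hrel : pvRel p m = -1 := by simp [pvRel, h1, h2]
      simp [pvChainStep, List.findIdx?_cons, hrel, h1, h2]
    · have hrel : pvRel p m = 0 := by simp [pvRel, h1, h2]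
      simp only [if_neg h1, if_neg h2, pvChainStep, List.map_cons, hrel,
        List.findIdx?_cons, bne_self_eq_false, Bool.false_eq_true, if_false]
      cases hf : (rest.map (fun p => pvRel p m)).findIdx? (fun r => r != 0) with
      | none => simp [List.take_length, List.drop_length]
      | some j =>
        simp only [Option.map_some, Option.getD_some, List.length_cons,
          List.getD_cons_succ]
        have hiff : (j + 1 < rest.length + 1) ↔ (j < rest.length) := by omega
        by_cases hc : j < rest.length ∧ (rest.map (fun p => pvRel p m)).getD j 0 < 0
        · rw [if_pos ⟨by omega, hc.2⟩, if_pos hc]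
          simp [List.take_succ_cons, List.drop_succ_cons]
        · rw [if_neg (by rw [hiff]; exact hc), if_neg hc]
          simp [List.take_length, List.drop_length]

lemma pvFindA_false_spec (qr msg : List (String × String)) :
    ∀ g, pvFindA qr g = some (false, msg) →
      msg ∈ g ∧
      ¬ (pvMsgGet msg "message_hash" = pvMsgGet qr "net_chain" ∨
         pvMsgGet msg "message_hash" = pvMsgGet qr "self_chain") ∧
      (pvMsgGet qr "message_hash" = pvMsgGet msg "net_chain" ∨
       pvMsgGet qr "message_hash" = pvMsgGet msg "self_chain") := by
  intro g
  induction g with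
  | nil => intro h; simp [pvFindA] at h
  | cons p rest ih =>
    intro h
    by_cases h1 : pvMsgGet p "message_hash" = pvMsgGet qr "net_chain" ∨
       pvMsgGet p "message_hash" = pvMsgGet qr "self_chain"
    · simp [pvFindA, h1] at h
    · by_cases h2 : pvMsgGet qr "message_hash" = pvMsgGet p "net_chain" ∨
         pvMsgGet qr "message_hash" = pvMsgGet p "self_chain"
      · simp only [pvFindA, if_neg h1, if_pos h2, Option.some.injEq, Prod.mk.injEq] at h
        obtain ⟨-, rfl⟩ := h
        exact ⟨List.mem_cons_self, h1, h2⟩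
      · simp [pvFindA, h1, h2] at h
        obtain ⟨hm, hc1, hc2⟩ := ih h
        exact ⟨List.mem_cons_of_mem _ hm, hc1, hc2⟩

lemma pvScanA_eq_chainStep (qr : List (String × String)) :
    ∀ g, pvScanA g qr = pvChainStep g qr := by
  intro g
  induction g with
  | nil => simp [pvScanA, pvFindA, pvChainStep]
  | cons p rest ih =>
    rw [pvChainStep_cons]
    by_cases h1 : pvMsgGet p "message_hash" = pvMsgGet qr "net_chain" ∨
       pvMsgGet p "message_hash" = pvMsgGet qr "self_chain"
    · simp [pvScanA, pvFindA, h1]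
    · by_cases h2 : pvMsgGet qr "message_hash" = pvMsgGet p "net_chain" ∨
         pvMsgGet qr "message_hash" = pvMsgGet p "self_chain"
      · have hfa : pvFindA qr (p :: rest) = some (false, p) := by
          simp [pvFindA, h1, h2]
        unfold pvScanA
        rw [hfa]
        show PySem.List.insert (p :: rest) (((PySem.List.index? (p :: rest) p).getD 0 : Nat) : Int) qr = _
        rw [PySem.List.index?_cons_self]
        simp [h1, h2, PySem.List.insert_zero]
      · have hfind : pvFindA qr (p :: rest) = pvFindA qr rest := by
          simp [pvFindA, h1, h2]
        rw [if_neg h1, if_neg h2, ← ih]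
        unfold pvScanA
        rw [hfind]
        cases hf : pvFindA qr rest with
        | none => simp
        | some bm =>
          obtain ⟨b, msg⟩ := bm
          cases b with
          | true => simp
          | false =>
            obtain ⟨hmem, hc1, hc2⟩ := pvFindA_false_spec qr msg rest hf
            have hne : p ≠ msg := by
              intro e; exact h2 (e ▸ hc2)
            obtain ⟨j, hj⟩ := Option.isSome_iff_exists.mp
              ((PySem.List.index?_isSome_iff rest msg).mpr hmem)
            obtain ⟨hjlt, -, -⟩ := PySem.List.getElem_of_index?_eq_some hj
            have hidx : PySem.List.index? (p :: rest) msg = some (j + 1) := by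
              rw [PySem.List.index?_cons_of_ne _ hne, hj]; rfl
            simp only [hidx, hj, Option.getD_some]
            rw [PySem.List.insert_natCast _ (j + 1) _ (by simp only [List.length_cons]; omega),
              PySem.List.insert_natCast _ j _ (Nat.le_of_lt hjlt),
              List.take_succ_cons, List.drop_succ_cons]
            rfl

lemma pvGet?_mapD (d : PySem.Dict String (List (List (String × String)))) (k : String) :
    (pvMapD d).get? k = (d.get? k).map pvChainOrder := by
  simp [pvMapD, PySem.Dict.get?, List.find?_map, Option.map_map, Function.comp_def]

lemma pvContains_mapD (d : PySem.Dict String (List (List (String × String)))) (k : String) :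
    (pvMapD d).contains k = d.contains k := by
  simp [pvMapD, PySem.Dict.contains, List.any_map, Function.comp_def]

lemma pvInsert_mapD (d : PySem.Dict String (List (List (String × String)))) (k : String)
    (v : List (List (String × String))) :
    (pvMapD d).insert k (pvChainOrder v) = pvMapD (d.insert k v) := by
  unfold PySem.Dict.insert
  rw [pvContains_mapD]
  by_cases hc : d.contains k = true
  · simp only [hc, if_pos]
    unfold pvMapD
    congr 1
    simp only [List.map_map]
    refine List.map_congr_left ?_
    intro kv _
    by_cases hk : (kv.1 == k) = true <;> simp [Function.comp, hk]
  · simp only [hc, if_neg, Bool.false_eq_true, not_false_eq_true]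
    unfold pvMapD
    congr 1
    simp

lemma pvChainOrder_append_singleton (g : List (List (String × String)))
    (m : List (String × String)) :
    pvChainOrder (g ++ [m]) = pvChainStep (pvChainOrder g) m := by
  simp [pvChainOrder, List.foldl_append]

lemma pvLoop_eq (msgs : List (List (String × String)))
    (d : PySem.Dict String (List (List (String × String)))) :
    msgs.foldl (fun tg qr =>
      let ts := pvMsgGet qr "timestamp"
      match tg.get? ts with
      | none => tg.insert ts [qr]
      | some g => tg.insert ts (pvScanA g qr)) (pvMapD d)
    = pvMapD (msgs.foldl (fun d m =>
        let ts := pvMsgGet m "timestamp"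
        d.insert ts (d.getD ts [] ++ [m])) d) := by
  induction msgs generalizing d with
  | nil => rfl
  | cons m ms ih =>
    simp only [List.foldl_cons]
    have hstep :
        (match (pvMapD d).get? (pvMsgGet m "timestamp") with
          | none => (pvMapD d).insert (pvMsgGet m "timestamp") [m]
          | some g => (pvMapD d).insert (pvMsgGet m "timestamp") (pvScanA g m))
        = pvMapD (d.insert (pvMsgGet m "timestamp")
            (d.getD (pvMsgGet m "timestamp") [] ++ [m])) := by
      rw [pvGet?_mapD]
      cases hg : d.get? (pvMsgGet m "timestamp") with
      | none =>
        have hv : d.getD (pvMsgGet m "timestamp") [] ++ [m] = [m] := by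
          simp [PySem.Dict.getD, hg]
        have hm : ([m] : List (List (String × String))) = pvChainOrder [m] := by
          simp [pvChainOrder, pvChainStep]
        simp only [Option.map_none, hv]
        conv_lhs => rw [hm]
        exact pvInsert_mapD d _ _
      | some g =>
        have hv : d.getD (pvMsgGet m "timestamp") [] ++ [m] = g ++ [m] := by
          simp [PySem.Dict.getD, hg]
        simp only [Option.map_some, hv]
        show (pvMapD d).insert (pvMsgGet m "timestamp") (pvScanA (pvChainOrder g) m) = _
        rw [pvScanA_eq_chainStep, ← pvChainOrder_append_singleton, pvInsert_mapD]
    exact hstep ▸ ih _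

-- the bucket fold of pvLoop_eq IS pvBucket (modify is insert-of-getD, fold pushed through map)
lemma pvBucket_eq (msgs : List (List (String × String))) :
    msgs.foldl (fun d m =>
        let ts := pvMsgGet m "timestamp"
        d.insert ts (d.getD ts [] ++ [m])) (PySem.Dict.mk [])
      = pvBucket msgs := by
  unfold pvBucket
  rw [List.foldl_map]
  rfl

lemma pvBucket_keys (msgs : List (List (String × String))) :
    (pvBucket msgs).keys = PySem.Set.ofList (msgs.map pvTs) := by
  unfold pvBucket
  rw [PySem.Dict.keys_foldl_modify_key]
  simp [PySem.Set.update_nil_left, List.map_map, Function.comp_def, PySem.Dict.keys]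

lemma pvBucket_nodup (msgs : List (List (String × String))) :
    (pvBucket msgs).keys.Nodup := by
  unfold pvBucket
  exact PySem.Dict.nodup_keys_foldl_modify_key _ _ _ _ _ (by simp [PySem.Dict.keys])

lemma pvBucket_getD (msgs : List (List (String × String))) (ts : String) :
    (pvBucket msgs).getD ts [] = msgs.filter (fun m => pvTs m == ts) := by
  unfold pvBucket
  rw [PySem.Dict.getD_foldl_modify_append]
  simp [List.filter_map, Function.comp_def, PySem.Dict.getD, PySem.Dict.get?]

-- sorted items of the chain-ordered dict, named: sorted keys, each paired with its group
lemma pvSorted_items (msgs : List (List (String × String))) :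
    PySem.List.sorted (pvMapD (pvBucket msgs)).items (fun kv => kv.1)
      = (PySem.List.sorted (pvBucket msgs).keys (fun x => x)).map
          (fun k => (k, pvChainOrder ((pvBucket msgs).getD k []))) := by
  have hnd := pvBucket_nodup msgs
  have hitems : (pvMapD (pvBucket msgs)).items
      = (pvBucket msgs).keys.map (fun k => (k, pvChainOrder ((pvBucket msgs).getD k []))) := by
    show ((pvBucket msgs).items.map (fun kv => (kv.1, pvChainOrder kv.2))) = _
    rw [PySem.Dict.items_eq_map_keys _ hnd []]
    simp [List.map_map, Function.comp_def]
  have hperm : ((PySem.List.sorted (pvBucket msgs).keys (fun x => x)).map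
      (fun k => (k, pvChainOrder ((pvBucket msgs).getD k [])))).Perm
      ((pvMapD (pvBucket msgs)).items) := by
    rw [hitems]
    exact (PySem.List.sorted_perm (pvBucket msgs).keys (fun x => x) false).map _
  have hle := PySem.List.sorted_pairwise (pvBucket msgs).keys (fun x => x)
  have hndk : (PySem.List.sorted (pvBucket msgs).keys (fun x => x)).Nodup :=
    ((PySem.List.sorted_perm (pvBucket msgs).keys (fun x => x) false).nodup_iff).mpr hnd
  have hlt : (PySem.List.sorted (pvBucket msgs).keys (fun x => x)).Pairwise (· < ·) :=
    (hle.and hndk).imp (fun h => lt_of_le_of_ne h.1 h.2)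
  exact PySem.List.sorted_eq_of_perm_of_pairwise_lt _ _ _ hperm
    (List.pairwise_map.mpr (by exact hlt))

-- ===== VERDICT (by name: the statement is the Claim_ definition above) =====
theorem sort_by_chain_spec : Claim_equal_sort_by_chain := by
  intro messages _ _
  unfold Spec_sort_by_chain sort_by_chain sort_by_chain_alt
  rw [show (PySem.Dict.mk [] : PySem.Dict String (List (List (String × String))))
        = pvMapD (PySem.Dict.mk []) from rfl,
    pvLoop_eq messages (PySem.Dict.mk []), pvBucket_eq]
  dsimp only
  rw [pvSorted_items]
  rw [List.map_map]
  rw [PySem.List.foldl_append_eq_flatMap]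
  have hkeys : PySem.Set.ofList (messages.map (fun m => pvMsgGet m "timestamp"))
      = (pvBucket messages).keys := (pvBucket_keys messages).symm
  rw [hkeys]
  simp only [List.nil_append, List.flatMap_map, Function.comp_def]
  congr 1
  funext ts
  rw [pvBucket_getD]
  rfl
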